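-- pv_equiv track=rewrite | github.com/Mawak0/ACA | lab6.py | segments_select
-- ===== SOURCE A (Python) =====
-- def segments_select(segments, L, R):
--     def sort_f(a):
--         return a[0]
--
--     segments.sort(key=sort_f)
--
--     right_max = L
--     answer = []
--     i = 0
--     n = len(segments)
--
--     while right_max < R:
--         best = right_max
--         best_seg = None
--
--         while i < n and segments[i][0] <= right_max:
--             if segments[i][1] > best:
--                 best = segments[i][1]
--                 best_seg = segments[i]
--             i += 1
--
--         if best_seg is None:
--             return None
--
--         answer.append(best_seg)
--         right_max = best
--
--     return answer
-- ===== SOURCE B (Python) =====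
-- def segments_select(segments, L, R):
--     segments.sort(key=lambda a: a[0])
--     right_max = L
--     answer = []
--     while right_max < R:
--         best = right_max
--         best_seg = None
--         for seg in segments:
--             if seg[0] <= right_max and seg[1] > best:
--                 best = seg[1]
--                 best_seg = seg
--         if best_seg is None:
--             return None
--         answer.append(best_seg)
--         right_max = best
--     return answer
-- ===== Notes on version B (the rewrite author's own statement) =====
-- stated objective: simpler
-- what changed: Replaces A's persistent forward pointer with nested early-stopping scans by one repeated full scan per greedy step that picks the first segment with start <= right_max and strictly maximal reach; correct because already-passed segments can never strictly improve right_max.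
import Mathlib
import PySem

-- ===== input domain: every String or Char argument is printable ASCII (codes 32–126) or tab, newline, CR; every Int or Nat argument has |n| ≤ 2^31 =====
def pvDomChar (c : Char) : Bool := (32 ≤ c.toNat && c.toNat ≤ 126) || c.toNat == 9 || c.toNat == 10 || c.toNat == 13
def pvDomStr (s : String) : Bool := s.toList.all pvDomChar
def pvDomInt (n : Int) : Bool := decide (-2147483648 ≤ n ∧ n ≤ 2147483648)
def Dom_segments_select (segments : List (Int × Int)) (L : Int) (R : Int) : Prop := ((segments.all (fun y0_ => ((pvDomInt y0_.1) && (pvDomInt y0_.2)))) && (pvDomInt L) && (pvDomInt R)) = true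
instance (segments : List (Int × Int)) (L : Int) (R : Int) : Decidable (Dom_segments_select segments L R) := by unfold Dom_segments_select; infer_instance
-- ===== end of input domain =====

-- B replaces A's persistent forward pointer (nested early-stopping scans) by one full scan of the
-- sorted list per greedy step; equivalence of the RETURN value is proved (both sort in place in Python).

-- ===== PORT A =====
-- A's inner while loop: the pointer i over the sorted list becomes the obvious structural
-- recursion over the remaining suffix; returns (remaining suffix, best, best_seg).
def innerA : List (Int × Int) → Int → Int → Option (Int × Int) → List (Int × Int) × Int × Option (Int × Int)
  | [], _, best, bs => ([], best, bs)
  | seg :: t, rm, best, bs =>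
    if seg.1 ≤ rm then
      if best < seg.2 then innerA t rm seg.2 (some seg)
      else innerA t rm best bs
    else (seg :: t, best, bs)

-- termination helper for outerA (cited in decreasing_by)
theorem innerA_len_le : ∀ (l : List (Int × Int)) (rm best : Int) (bs : Option (Int × Int)),
    (innerA l rm best bs).1.length ≤ l.length := by
  intro l
  induction l with
  | nil => intro rm best bs; simp [innerA]
  | cons seg t ih =>
    intro rm best bs
    simp only [innerA]
    split
    · split
      · exact le_trans (ih ..) (by simp)
      · exact le_trans (ih ..) (by simp)
    · simp

theorem innerA_progress : ∀ (l : List (Int × Int)) (rm best : Int) (seg' : (Int × Int)),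
    (innerA l rm best none).2.2 = some seg' → (innerA l rm best none).1.length < l.length := by
  intro l
  induction l with
  | nil => intro rm best seg' h; simp [innerA] at h
  | cons seg t ih =>
    intro rm best seg' hsome
    simp only [innerA] at hsome ⊢
    split at hsome
    · split at hsome
      · simp only [*, if_pos]
        calc (innerA t rm seg.2 (some seg)).1.length ≤ t.length := innerA_len_le ..
          _ < (seg :: t).length := by simp
      · simp only [*, if_pos]
        exact Nat.lt_of_lt_of_le (ih rm best seg' hsome) (by simp)
    · simp at hsome

-- A's outer while loop (state: remaining suffix, right_max, answer)
def outerA (R : Int) (rest : List (Int × Int)) (rm : Int) (ans : List (Int × Int)) :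
    Option (List (Int × Int)) :=
  if rm < R then
    match h : innerA rest rm rm none with
    | (_, _, none) => none
    | (rest', best, some seg) => outerA R rest' best (ans ++ [seg])
  else some ans
termination_by rest.length
decreasing_by
  have := innerA_progress rest rm rm seg (by rw [h])
  rw [h] at this; exact this

def segments_select (segments : List (Int × Int)) (L : Int) (R : Int) : Option (List (Int × Int)) :=
  outerA R (PySem.List.sorted segments (fun a => a.1) false) L []

-- ===== PORT B =====
-- B's inner for loop: a full scan computing (best, best_seg)
def scanB : List (Int × Int) → Int → Int → Option (Int × Int) → Int × Option (Int × Int)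
  | [], _, best, bs => (best, bs)
  | seg :: t, rm, best, bs =>
    if seg.1 ≤ rm ∧ best < seg.2 then scanB t rm seg.2 (some seg)
    else scanB t rm best bs

-- termination helpers for outerB (cited in decreasing_by)
theorem scanB_spec : ∀ (l : List (Int × Int)) (rm best : Int) (bs : Option (Int × Int)),
    best ≤ (scanB l rm best bs).1 ∧
    (((scanB l rm best bs).2 = bs ∧ (scanB l rm best bs).1 = best) ∨
      ∃ s', (scanB l rm best bs).2 = some s' ∧ s' ∈ l ∧ s'.2 = (scanB l rm best bs).1 ∧
        best < (scanB l rm best bs).1) := by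
  intro l
  induction l with
  | nil => intro rm best bs; simp [scanB]
  | cons seg t ih =>
    intro rm best bs
    simp only [scanB]
    split
    · rename_i hc
      rcases ih rm seg.2 (some seg) with ⟨hle, hcase⟩
      refine ⟨le_trans (le_of_lt hc.2) hle, ?_⟩
      rcases hcase with ⟨h1, h2⟩ | ⟨s', h1, h2, h3, h4⟩
      · exact Or.inr ⟨seg, h1, by simp, by rw [h2], by rw [h2]; exact hc.2⟩
      · exact Or.inr ⟨s', h1, by simp [h2], h3, lt_trans hc.2 h4⟩
    · rcases ih rm best bs with ⟨hle, hcase⟩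
      refine ⟨hle, ?_⟩
      rcases hcase with ⟨h1, h2⟩ | ⟨s', h1, h2, h3, h4⟩
      · exact Or.inl ⟨h1, h2⟩
      · exact Or.inr ⟨s', h1, by simp [h2], h3, h4⟩

theorem countP_strict_lt (l : List (Int × Int)) (rm best : Int) (hrb : rm < best)
    (hw : ∃ x ∈ l, x.2 = best) :
    (l.filter (fun p => decide (best < p.2))).length < (l.filter (fun p => decide (rm < p.2))).length := by
  rcases hw with ⟨x, hx, hxb⟩
  rcases List.append_of_mem hx with ⟨l1, l2, rfl⟩
  simp only [← List.countP_eq_length_filter, List.countP_append, List.countP_cons]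
  have m1 : l1.countP (fun p => decide (best < p.2)) ≤ l1.countP (fun p => decide (rm < p.2)) := by
    apply List.countP_mono_left; intro a _ h; simp at h ⊢; omega
  have m2 : l2.countP (fun p => decide (best < p.2)) ≤ l2.countP (fun p => decide (rm < p.2)) := by
    apply List.countP_mono_left; intro a _ h; simp at h ⊢; omega
  have hx1 : (decide (best < x.2) : Bool) = false := by simp [hxb]
  have hx2 : (decide (rm < x.2) : Bool) = true := by simp [hxb]; exact hrb
  rw [hx1, hx2]
  simp
  omega

-- B's outer while loop (state: right_max, answer); s is the sorted list, scanned fully each time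
def outerB (s : List (Int × Int)) (R : Int) (rm : Int) (ans : List (Int × Int)) :
    Option (List (Int × Int)) :=
  if rm < R then
    match h : scanB s rm rm none with
    | (_, none) => none
    | (best, some seg) => outerB s R best (ans ++ [seg])
  else some ans
termination_by (s.filter (fun p => decide (rm < p.2))).length
decreasing_by
  have hs := scanB_spec s rm rm none
  rw [h] at hs
  rcases hs with ⟨_, hcase⟩
  rcases hcase with ⟨h1, _⟩ | ⟨s', h1, h2, h3, h4⟩
  · simp at h1
  · simp only [Option.some.injEq] at h1
    exact countP_strict_lt s rm best h4 ⟨s', h2, by rw [h3, h1]⟩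

def segments_select_alt (segments : List (Int × Int)) (L : Int) (R : Int) : Option (List (Int × Int)) :=
  outerB (PySem.List.sorted segments (fun a => a.1) false) R L []

-- ===== PRECONDITION & SPEC =====
def Spec_segments_select (segments : List (Int × Int)) (L : Int) (R : Int) (out : Option (List (Int × Int))) : Prop := out = segments_select_alt segments L R
instance (segments : List (Int × Int)) (L : Int) (R : Int) (out : Option (List (Int × Int))) : Decidable (Spec_segments_select segments L R out) := by unfold Spec_segments_select; infer_instance

-- ===== CLAIM (what is proved, stated in full; the proofs are below) =====
def Claim_equal_segments_select : Prop := ∀ (segments : List (Int × Int)) (L : Int) (R : Int), Dom_segments_select segments L R → Spec_segments_select segments L R (segments_select segments L R)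

-- ===== LEMMAS AND PROOFS =====

-- a scan never triggered by elements whose reach is at most the running best leaves the state alone
theorem scanB_skip_prefix : ∀ (pre l : List (Int × Int)) (rm : Int) (bs : Option (Int × Int)),
    (∀ p ∈ pre, p.2 ≤ rm) → scanB (pre ++ l) rm rm bs = scanB l rm rm bs := by
  intro pre
  induction pre with
  | nil => intro l rm bs _; simp
  | cons p t ih =>
    intro l rm bs hpre
    have hp : p.2 ≤ rm := hpre p (by simp)
    simp only [List.cons_append, scanB]
    rw [if_neg (by intro hc; omega)]
    exact ih l rm bs (fun q hq => hpre q (by simp [hq]))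

theorem scanB_noop_tail : ∀ (l : List (Int × Int)) (rm best : Int) (bs : Option (Int × Int)),
    (∀ p ∈ l, rm < p.1) → scanB l rm best bs = (best, bs) := by
  intro l
  induction l with
  | nil => intro rm best bs _; simp [scanB]
  | cons seg t ih =>
    intro rm best bs hl
    have h1 : rm < seg.1 := hl seg (by simp)
    simp only [scanB]
    rw [if_neg (by intro hc; omega)]
    exact ih rm best bs (fun q hq => hl q (by simp [hq]))

-- on a list sorted by start, B's full scan computes exactly A's pointer scan's (best, best_seg)
theorem scan_eq_inner : ∀ (l : List (Int × Int)) (rm best : Int) (bs : Option (Int × Int)),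
    l.Pairwise (fun a b => a.1 ≤ b.1) →
    scanB l rm best bs = (innerA l rm best bs).2 := by
  intro l
  induction l with
  | nil => intro rm best bs _; simp [scanB, innerA]
  | cons seg t ih =>
    intro rm best bs hpw
    rcases List.pairwise_cons.mp hpw with ⟨hhead, htail⟩
    simp only [scanB, innerA]
    by_cases h1 : seg.1 ≤ rm
    · by_cases h2 : best < seg.2
      · rw [if_pos ⟨h1, h2⟩, if_pos h1, if_pos h2]; exact ih rm seg.2 (some seg) htail
      · rw [if_neg (by intro hc; exact h2 hc.2), if_pos h1, if_neg h2]; exact ih rm best bs htail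
    · rw [if_neg (by intro hc; exact h1 hc.1), if_neg h1]
      exact scanB_noop_tail t rm best bs (fun q hq => lt_of_lt_of_le (by omega) (hhead q hq))

-- the elements A's pointer skips have start ≤ rm and reach ≤ the resulting best, and best only grows
theorem innerA_decomp : ∀ (l : List (Int × Int)) (rm best : Int) (bs : Option (Int × Int)),
    ∃ c, l = c ++ (innerA l rm best bs).1 ∧
      (∀ p ∈ c, p.2 ≤ (innerA l rm best bs).2.1) ∧ best ≤ (innerA l rm best bs).2.1 := by
  intro l
  induction l with
  | nil => intro rm best bs; exact ⟨[], by simp [innerA]⟩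
  | cons seg t ih =>
    intro rm best bs
    simp only [innerA]
    by_cases h1 : seg.1 ≤ rm
    · by_cases h2 : best < seg.2
      · rw [if_pos h1, if_pos h2]
        rcases ih rm seg.2 (some seg) with ⟨c, hc1, hc2, hc3⟩
        exact ⟨seg :: c, by rw [List.cons_append, ← hc1], by
          intro p hp
          rcases List.mem_cons.mp hp with rfl | hp
          · exact hc3
          · exact hc2 p hp, le_trans (le_of_lt h2) hc3⟩
      · rw [if_pos h1, if_neg h2]
        rcases ih rm best bs with ⟨c, hc1, hc2, hc3⟩
        exact ⟨seg :: c, by rw [List.cons_append, ← hc1], by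
          intro p hp
          rcases List.mem_cons.mp hp with rfl | hp
          · omega
          · exact hc2 p hp, hc3⟩
    · rw [if_neg h1]
      exact ⟨[], by simp⟩

-- main loop equivalence: A's pointer loop over the suffix equals B's rescanning loop over the whole list
theorem outer_eq : ∀ (n : ℕ) (R : Int) (s pre rest : List (Int × Int)) (rm : Int) (ans : List (Int × Int)),
    s.Pairwise (fun a b => a.1 ≤ b.1) → s = pre ++ rest → (∀ p ∈ pre, p.2 ≤ rm) →
    rest.length ≤ n → outerA R rest rm ans = outerB s R rm ans := by
  intro n
  induction n with
  | zero =>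
    intro R s pre rest rm ans hpw hsplit hpre hlen
    have hrest : rest = [] := List.length_eq_zero_iff.mp (Nat.le_zero.mp hlen)
    subst hrest
    rw [outerA, outerB]
    by_cases hR : rm < R
    · rw [if_pos hR, if_pos hR]
      have hscan : scanB s rm rm none = (rm, none) := by
        rw [hsplit, scanB_skip_prefix pre [] rm none hpre]; rfl
      rw [hscan]
      rfl
    · rw [if_neg hR, if_neg hR]
  | succ m ih =>
    intro R s pre rest rm ans hpw hsplit hpre hlen
    rw [outerA, outerB]
    by_cases hR : rm < R
    · rw [if_pos hR, if_pos hR]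
      have hrestpw : rest.Pairwise (fun a b => a.1 ≤ b.1) := by
        rw [hsplit] at hpw
        exact (List.pairwise_append.mp hpw).2.1
      rcases hA : innerA rest rm rm none with ⟨rest', best, bs⟩
      have hscan : scanB s rm rm none = (best, bs) := by
        rw [hsplit, scanB_skip_prefix pre rest rm none hpre,
          scan_eq_inner rest rm rm none hrestpw, hA]
      rw [hscan]
      rcases bs with _ | seg
      · rfl
      · show outerA R rest' best (ans ++ [seg]) = outerB s R best (ans ++ [seg])
        rcases innerA_decomp rest rm rm none with ⟨c, hc1, hc2, hc3⟩
        rw [hA] at hc1 hc2 hc3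
        have hlen' : rest'.length ≤ m := by
          have hprog := innerA_progress rest rm rm seg (by rw [hA])
          rw [hA] at hprog
          simp only at hprog
          omega
        exact ih R s (pre ++ c) rest' best (ans ++ [seg]) hpw
          (by rw [hsplit, hc1, List.append_assoc])
          (by
            intro p hp
            rcases List.mem_append.mp hp with hp | hp
            · exact le_trans (hpre p hp) hc3
            · exact hc2 p hp)
          hlen'
    · rw [if_neg hR, if_neg hR]

-- ===== VERDICT (by name: the statement is the Claim_ definition above) =====
theorem segments_select_spec : Claim_equal_segments_select := by
  intro segments L R _
  unfold Spec_segments_select segments_select segments_select_alt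
  exact outer_eq (PySem.List.sorted segments (fun a => a.1) false).length R
    (PySem.List.sorted segments (fun a => a.1) false) []
    (PySem.List.sorted segments (fun a => a.1) false) L []
    (PySem.List.sorted_pairwise ..) rfl (by simp) le_rfl
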